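-- pv_equiv track=rewrite | github.com/yenru0/CodeObjecct | storage/zeta/py/completed/11509.py | solve
-- ===== SOURCE A (Python) =====
-- def solve(N, H):
--     lasts = []
--     for i, h in enumerate(H):
--         for j, l in enumerate(lasts):
--             if h == l - 1:
--                 lasts[j] -= 1
--                 break
--         else:
--             lasts.append(h)
--
--     return len(lasts)
-- ===== SOURCE B (Python) =====
-- def solve(N, H):
--     # Parenthesis-balance reformulation: treat each occurrence of v as a "closer"
--     # for pair (v, v+1) and as an "opener" for pair (v-1, v).  A new arrow starts
--     # at height h exactly when the running difference (#h seen) - (#(h+1) seen)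
--     # reaches a new maximum; the answer is the number of such record events.
--     d = {}   # d[v] = (#v seen) - (#(v+1) seen) so far
--     m = {}   # m[v] = running maximum of d[v]
--     ans = 0
--     for h in H:
--         d[h] = d.get(h, 0) + 1
--         if d[h] > m.get(h, 0):
--             m[h] = d[h]
--             ans += 1
--         d[h - 1] = d.get(h - 1, 0) - 1
--     return ans
-- ===== Notes on version B (the rewrite author's own statement) =====
-- stated objective: faster
-- what changed: Replaces A's greedy simulation (scan a list of live arrow heights and decrement a match) with a parenthesis-balance characterization: h starts a new arrow iff the running difference #h - #(h+1) hits a new maximum, maintained in two dicts in one O(N) pass with no inner scan and no matching.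
import Mathlib
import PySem

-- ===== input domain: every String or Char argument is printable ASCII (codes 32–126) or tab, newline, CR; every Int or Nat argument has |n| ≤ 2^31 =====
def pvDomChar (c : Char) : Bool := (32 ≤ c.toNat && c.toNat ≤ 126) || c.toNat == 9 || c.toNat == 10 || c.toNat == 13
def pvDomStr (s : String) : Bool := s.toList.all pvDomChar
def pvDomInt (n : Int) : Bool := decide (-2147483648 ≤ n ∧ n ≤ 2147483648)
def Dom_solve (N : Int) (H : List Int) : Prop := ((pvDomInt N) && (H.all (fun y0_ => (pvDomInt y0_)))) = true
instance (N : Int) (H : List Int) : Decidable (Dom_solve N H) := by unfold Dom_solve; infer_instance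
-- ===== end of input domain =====

-- B replaces A's greedy simulation of live arrow heights by a parenthesis-balance
-- count of record prefix maxima of #h - #(h+1), one O(N) pass (asymptotic speed-up).

-- ===== PORT A =====
-- inner for-loop over `lasts` with break: returns the updated list if some
-- element l with h == l - 1 was decremented, none if the loop fell through (else:).
def solveInner (h : Int) : List Int → Option (List Int)
  | [] => none
  | l :: rest =>
    if h = l - 1 then some ((l - 1) :: rest)
    else (solveInner h rest).map (fun t => l :: t)

-- body of the outer for-loop of A
def solveStepA (lasts : List Int) (h : Int) : List Int :=
  match solveInner h lasts with
  | some ls => ls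
  | none => lasts ++ [h]

def solve (N : Int) (H : List Int) : Int :=
  ((H.foldl solveStepA []).length : Int)

-- ===== PORT B =====
-- body of the for-loop of B: state = (d, m, ans)
def solveStepB (st : PySem.Dict Int Int × PySem.Dict Int Int × Int) (h : Int) :
    PySem.Dict Int Int × PySem.Dict Int Int × Int :=
  let d := st.1
  let m := st.2.1
  let ans := st.2.2
  let d1 := d.insert h (d.getD h 0 + 1)
  if d1.getD h 0 > m.getD h 0 then
    (d1.insert (h - 1) (d1.getD (h - 1) 0 - 1), m.insert h (d1.getD h 0), ans + 1)
  else
    (d1.insert (h - 1) (d1.getD (h - 1) 0 - 1), m, ans)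

def solve_alt (N : Int) (H : List Int) : Int :=
  (H.foldl solveStepB (PySem.Dict.empty, PySem.Dict.empty, 0)).2.2

-- ===== PRECONDITION & SPEC =====
def Spec_solve (N : Int) (H : List Int) (out : Int) : Prop := out = solve_alt N H
instance (N : Int) (H : List Int) (out : Int) : Decidable (Spec_solve N H out) := by unfold Spec_solve; infer_instance

-- ===== CLAIM (what is proved, stated in full; the proofs are below) =====
def Claim_equal_solve : Prop := ∀ (N : Int) (H : List Int), Dom_solve N H → Spec_solve N H (solve N H)

-- ===== LEMMAS AND PROOFS =====

theorem inner_none (h : Int) : ∀ lasts : List Int,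
    solveInner h lasts = none → lasts.count (h + 1) = 0 := by
  intro lasts
  induction lasts with
  | nil => intro _; simp
  | cons l rest ih =>
    intro hnone
    simp only [solveInner] at hnone
    by_cases hc : h = l - 1
    · simp only [if_pos hc] at hnone
      exact absurd hnone (by simp)
    · simp only [if_neg hc] at hnone
      cases hr : solveInner h rest with
      | some t => rw [hr] at hnone; exact absurd hnone (by simp)
      | none =>
        have hl : l ≠ h + 1 := by omega
        simp [ih hr, hl]

theorem inner_some (h : Int) : ∀ (lasts ls : List Int), solveInner h lasts = some ls →
    ls.length = lasts.length ∧
    ∀ k : Int, ls.count k + (if k = h + 1 then 1 else 0)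
             = lasts.count k + (if k = h then 1 else 0) := by
  intro lasts
  induction lasts with
  | nil => intro ls hsome; simp [solveInner] at hsome
  | cons l rest ih =>
    intro ls hsome
    simp only [solveInner] at hsome
    split_ifs at hsome with hc
    · cases hsome
      constructor
      · simp
      · intro k
        simp only [List.count_cons, beq_iff_eq]
        split_ifs <;> omega
    · cases hr : solveInner h rest with
      | none => rw [hr] at hsome; simp at hsome
      | some t =>
        rw [hr] at hsome
        simp only [Option.map_some] at hsome
        cases hsome
        obtain ⟨hlen, hcnt⟩ := ih t hr
        constructor
        · simp [hlen]
        · intro k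
          have := hcnt k
          simp only [List.count_cons, beq_iff_eq]
          split_ifs at this ⊢ <;> omega

-- invariant: for every v, the number of live arrow heads at v equals
-- m[v-1] - d[v-1], and ans equals the number of arrows so far.
theorem loop_inv : ∀ (H lasts : List Int) (d m : PySem.Dict Int Int) (ans : Int),
    (∀ v : Int, (lasts.count v : Int) = m.getD (v - 1) 0 - d.getD (v - 1) 0) →
    ans = (lasts.length : Int) →
    ((H.foldl solveStepA lasts).length : Int) = (H.foldl solveStepB (d, m, ans)).2.2 := by
  intro H
  induction H with
  | nil => intro lasts d m ans _ hans; simpa using hans.symm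
  | cons h rest ih =>
    intro lasts d m ans hinv hans
    simp only [List.foldl_cons]
    have hcnt1 : (lasts.count (h + 1) : Int) = m.getD h 0 - d.getD h 0 := by
      have := hinv (h + 1); simpa using this
    have f1 : (d.insert h (d.getD h 0 + 1)).getD h 0 = d.getD h 0 + 1 := by
      rw [PySem.Dict.getD_insert]; simp
    have f2 : (d.insert h (d.getD h 0 + 1)).getD (h - 1) 0 = d.getD (h - 1) 0 := by
      rw [PySem.Dict.getD_insert, if_neg (by omega)]
    have f3 : ((d.insert h (d.getD h 0 + 1)).insert (h - 1)
        ((d.insert h (d.getD h 0 + 1)).getD (h - 1) 0 - 1)).getD (h - 1) 0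
        = d.getD (h - 1) 0 - 1 := by
      rw [PySem.Dict.getD_insert, if_pos rfl, f2]
    have f4 : ((d.insert h (d.getD h 0 + 1)).insert (h - 1)
        ((d.insert h (d.getD h 0 + 1)).getD (h - 1) 0 - 1)).getD h 0
        = d.getD h 0 + 1 := by
      rw [PySem.Dict.getD_insert, if_neg (by omega), f1]
    have f5 : ∀ k : Int, k ≠ h - 1 → k ≠ h →
        ((d.insert h (d.getD h 0 + 1)).insert (h - 1)
          ((d.insert h (d.getD h 0 + 1)).getD (h - 1) 0 - 1)).getD k 0 = d.getD k 0 := by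
      intro k hk1 hk2
      rw [PySem.Dict.getD_insert, if_neg hk1, PySem.Dict.getD_insert, if_neg hk2]
    cases hinner : solveInner h lasts with
    | none =>
      have h0 : lasts.count (h + 1) = 0 := inner_none h lasts hinner
      have hbump : (d.insert h (d.getD h 0 + 1)).getD h 0 > m.getD h 0 := by
        rw [f1]; omega
      have hstepA : solveStepA lasts h = lasts ++ [h] := by simp [solveStepA, hinner]
      have hstepB : solveStepB (d, m, ans) h =
          ((d.insert h (d.getD h 0 + 1)).insert (h - 1)
              ((d.insert h (d.getD h 0 + 1)).getD (h - 1) 0 - 1),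
           m.insert h ((d.insert h (d.getD h 0 + 1)).getD h 0), ans + 1) := by
        simp only [solveStepB]
        rw [if_pos hbump]
      rw [hstepA, hstepB]
      have f6 : (m.insert h ((d.insert h (d.getD h 0 + 1)).getD h 0)).getD h 0
          = d.getD h 0 + 1 := by
        rw [PySem.Dict.getD_insert, if_pos rfl, f1]
      have f7 : ∀ k : Int, k ≠ h →
          (m.insert h ((d.insert h (d.getD h 0 + 1)).getD h 0)).getD k 0 = m.getD k 0 := by
        intro k hk
        rw [PySem.Dict.getD_insert, if_neg hk]
      apply ih
      · intro v
        by_cases hv : v = h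
        · subst hv
          rw [f7 (v - 1) (by omega), f3]
          have hc : (lasts ++ [v]).count v = lasts.count v + 1 := by simp
          have hiv := hinv v
          rw [hc]; push_cast; omega
        · by_cases hv2 : v = h + 1
          · subst hv2
            rw [show h + 1 - 1 = h from by ring, f6, f4]
            have hne : h + 1 ≠ h := by omega
            have h1 : List.count (h + 1) [h] = 0 :=
              List.count_eq_zero.mpr (by intro hm; exact hne (by simpa using hm))
            have hc : (lasts ++ [h]).count (h + 1) = lasts.count (h + 1) := by
              rw [List.count_append, h1]; omega
            rw [hc, h0]; push_cast; ring
          · rw [f7 (v - 1) (by omega), f5 (v - 1) (by omega) (by omega)]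
            have h1 : List.count v [h] = 0 :=
              List.count_eq_zero.mpr (by intro hm; exact hv (by simpa using hm))
            have hc : (lasts ++ [h]).count v = lasts.count v := by
              rw [List.count_append, h1]; omega
            rw [hc]; exact hinv v
      · simp [hans]
    | some ls =>
      obtain ⟨hlen, hcount⟩ := inner_some h lasts ls hinner
      have hge : 1 ≤ lasts.count (h + 1) := by
        have := hcount (h + 1)
        have hne : ¬ ((h : Int) + 1 = h) := by omega
        simp [hne] at this
        omega
      have hnobump : ¬ ((d.insert h (d.getD h 0 + 1)).getD h 0 > m.getD h 0) := by
        rw [f1]; omega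
      have hstepA : solveStepA lasts h = ls := by simp [solveStepA, hinner]
      have hstepB : solveStepB (d, m, ans) h =
          ((d.insert h (d.getD h 0 + 1)).insert (h - 1)
              ((d.insert h (d.getD h 0 + 1)).getD (h - 1) 0 - 1), m, ans) := by
        simp only [solveStepB]
        rw [if_neg hnobump]
      rw [hstepA, hstepB]
      apply ih
      · intro v
        have hcv := hcount v
        by_cases hv : v = h
        · subst hv
          rw [f3]
          have hne : ¬ (v = v + 1) := by omega
          simp [hne] at hcv
          have hiv := hinv v
          omega
        · by_cases hv2 : v = h + 1
          · subst hv2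
            rw [show h + 1 - 1 = h from by ring, f4]
            have hne : ¬ ((h : Int) + 1 = h) := by omega
            simp [hne] at hcv
            omega
          · rw [f5 (v - 1) (by omega) (by omega)]
            simp [hv, hv2] at hcv
            have hiv := hinv v
            omega
      · rw [hans, hlen]

-- ===== VERDICT (by name: the statement is the Claim_ definition above) =====
theorem solve_spec : Claim_equal_solve := by
  intro N H _
  unfold Spec_solve solve solve_alt
  exact loop_inv H [] PySem.Dict.empty PySem.Dict.empty 0 (by intro v; simp) (by simp)
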